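-- pv_equiv track=rewrite | github.com/ajnirp/binarysearch | roomba.py | solve
-- ===== SOURCE A (Python) =====
-- def solve(moves, x0, y0):
--     x, y = 0, 0
--     for move in moves:
--         if move[0] == 'N':
--             y += 1
--         elif move[0] == 'E':
--             x += 1
--         elif move[0] == 'W':
--             x -= 1
--         elif move[0] == 'S':
--             y -= 1
--     return x == x0 and y == y0
-- ===== SOURCE B (Python) =====
-- def solve(moves, x0, y0):
--     heads = [move[0] for move in moves]
--     return heads.count('E') - heads.count('W') == x0 and heads.count('N') - heads.count('S') == y0
-- ===== Notes on version B (the rewrite author's own statement) =====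
-- stated objective: idiomatic
-- what changed: B replaces A's single branch-per-direction loop with running x/y accumulators by staged library scans: it extracts the leading characters once, then calls list.count four times and compares the two differences arithmetically.
import Mathlib
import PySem

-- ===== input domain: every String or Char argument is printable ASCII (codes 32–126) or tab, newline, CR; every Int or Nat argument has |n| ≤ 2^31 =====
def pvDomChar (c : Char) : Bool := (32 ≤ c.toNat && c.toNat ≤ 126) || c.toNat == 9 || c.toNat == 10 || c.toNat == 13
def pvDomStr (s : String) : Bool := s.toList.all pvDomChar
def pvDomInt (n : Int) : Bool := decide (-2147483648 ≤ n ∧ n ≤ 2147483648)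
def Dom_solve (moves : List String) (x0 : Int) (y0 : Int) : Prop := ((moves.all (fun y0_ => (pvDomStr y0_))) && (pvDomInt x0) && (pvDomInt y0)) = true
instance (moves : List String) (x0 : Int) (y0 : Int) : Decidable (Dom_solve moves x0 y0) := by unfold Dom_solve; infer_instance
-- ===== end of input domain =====

-- B extracts the leading characters once and derives x and y from four list.count
-- library scans instead of A's branch-per-direction accumulator loop (idiomatic, same cost).


-- ===== PORT A =====
-- move[0] is ported as (PySem.Str.pyGet? move 0).getD ' '; under Pre_solve every move is
-- nonempty so pyGet? is always some and the default is never taken (Python raises on "").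
def solve (moves : List String) (x0 : Int) (y0 : Int) : Bool :=
  let st := moves.foldl (fun (p : Int × Int) move =>
    let c := (PySem.Str.pyGet? move 0).getD ' '
    if c = 'N' then (p.1, p.2 + 1)
    else if c = 'E' then (p.1 + 1, p.2)
    else if c = 'W' then (p.1 - 1, p.2)
    else if c = 'S' then (p.1, p.2 - 1)
    else p) (0, 0)
  st.1 == x0 && st.2 == y0

-- ===== PORT B =====
-- heads = [move[0] for move in moves]; then four list.count scans and arithmetic.
def solve_alt (moves : List String) (x0 : Int) (y0 : Int) : Bool :=
  let heads := moves.map (fun m => (PySem.Str.pyGet? m 0).getD ' ')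
  ((PySem.List.count heads 'E' : Int) - (PySem.List.count heads 'W' : Int) == x0) &&
  ((PySem.List.count heads 'N' : Int) - (PySem.List.count heads 'S' : Int) == y0)

-- ===== PRECONDITION & SPEC =====
-- Pre_ excludes lists containing an empty move string, on which Python A (and B) raise
-- IndexError at move[0].
def Pre_solve (moves : List String) (x0 : Int) (y0 : Int) : Prop :=
  ∀ m ∈ moves, m ≠ ""
instance (moves : List String) (x0 : Int) (y0 : Int) : Decidable (Pre_solve moves x0 y0) := by
  unfold Pre_solve; infer_instance
def pvWitness_solve : List String × Int × Int := (["NORTH", "EAST", "EAST"], 2, 1)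

def Spec_solve (moves : List String) (x0 : Int) (y0 : Int) (out : Bool) : Prop := out = solve_alt moves x0 y0
instance (moves : List String) (x0 : Int) (y0 : Int) (out : Bool) : Decidable (Spec_solve moves x0 y0 out) := by unfold Spec_solve; infer_instance

-- ===== CLAIM (what is proved, stated in full; the proofs are below) =====
def Claim_equal_solve : Prop := ∀ (moves : List String) (x0 : Int) (y0 : Int), Dom_solve moves x0 y0 → Pre_solve moves x0 y0 → Spec_solve moves x0 y0 (solve moves x0 y0)

-- ===== LEMMAS AND PROOFS =====

def pvStep (p : Int × Int) (c : Char) : Int × Int :=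
  if c = 'N' then (p.1, p.2 + 1)
  else if c = 'E' then (p.1 + 1, p.2)
  else if c = 'W' then (p.1 - 1, p.2)
  else if c = 'S' then (p.1, p.2 - 1)
  else p

-- A's accumulator after the fold, characterised by counts of the characters seen.
theorem pvFold_char (l : List Char) (x y : Int) :
    l.foldl pvStep (x, y)
    = (x + (l.count 'E' : Int) - (l.count 'W' : Int),
       y + (l.count 'N' : Int) - (l.count 'S' : Int)) := by
  induction l generalizing x y with
  | nil => simp
  | cons c l ih =>
    simp only [List.foldl_cons, ih, List.count_cons, pvStep]
    split_ifs with hN hE hW hS <;> subst_eqs <;>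
      simp_all <;> omega

-- ===== VERDICT (by name: the statement is the Claim_ definition above) =====
theorem solve_spec : Claim_equal_solve := by
  intro moves x0 y0 _ _
  unfold Spec_solve solve solve_alt
  have h := pvFold_char (moves.map (fun m => (PySem.Str.pyGet? m 0).getD ' ')) 0 0
  rw [List.foldl_map] at h
  simp only [pvStep] at h
  rw [h]
  simp [PySem.List.count_eq]
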